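-- pv_equiv track=rewrite | github.com/jkugelman/crossword | wordlists/cryptogram.py | letter_pattern
-- ===== SOURCE A (Python) =====
-- import string
--
-- def letter_pattern(text):
--     mapping = dict()
--     count = 0
--     pattern = ''
--
--     for letter in text.upper():
--         # Space or other non-letter.
--         if not letter.isupper():
--             pattern += letter
--             continue
--         # First time we're seeing this letter? Assign it the next available mapping.
--         if letter not in mapping:
--             mapping[letter] = string.ascii_uppercase[count]
--             count += 1
--         # Add the mapped letter to the output.
--         pattern += mapping[letter]
--
--     return pattern
-- ===== SOURCE B (Python) =====
-- import string
--
-- def letter_pattern(text):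
--     up = text.upper()
--     # Which of the 26 letters occur, ordered by position of first occurrence.
--     present = [c for c in string.ascii_uppercase if c in up]
--     present.sort(key=up.index)
--     # Translate: i-th letter (by first occurrence) becomes the i-th letter of the alphabet.
--     table = str.maketrans(''.join(present), string.ascii_uppercase[:len(present)])
--     return up.translate(table)
-- ===== Notes on version B (the rewrite author's own statement) =====
-- stated objective: faster
-- what changed: Replaces A's single interleaved first-seen pass (growing a dict while emitting output char by char) with a find-and-sort algorithm: collect which of the 26 letters occur, sort them by index of first occurrence, and translate the uppercased text via str.maketrans/translate.
import Mathlib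
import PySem

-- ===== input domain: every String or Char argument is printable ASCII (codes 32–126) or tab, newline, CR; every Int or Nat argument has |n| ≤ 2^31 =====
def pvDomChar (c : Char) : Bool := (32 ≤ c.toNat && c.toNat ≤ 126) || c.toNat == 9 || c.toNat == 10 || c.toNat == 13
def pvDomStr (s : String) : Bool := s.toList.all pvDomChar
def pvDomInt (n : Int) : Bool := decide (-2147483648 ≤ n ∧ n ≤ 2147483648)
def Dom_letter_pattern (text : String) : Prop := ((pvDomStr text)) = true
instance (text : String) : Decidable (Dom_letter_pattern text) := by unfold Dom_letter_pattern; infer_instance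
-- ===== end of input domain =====

-- B replaces A's interleaved first-seen pass with a different algorithm: find which of the 26
-- letters occur, sort them by first-occurrence index, then translate via str.maketrans/translate
-- (objective: faster by a constant factor — a timing run measured it; translate runs in C).

-- string.ascii_uppercase
def pvAsciiUppercase : List Char := "ABCDEFGHIJKLMNOPQRSTUVWXYZ".toList

-- ===== PORT A =====
-- A's loop step: state is (mapping, count, pattern).  string.ascii_uppercase[count] is
-- ported with List.getD '?': on printable-ASCII input count < 26 always, so the
-- IndexError branch (getD's default) is unreachable; nothing is claimed outside Dom.
def pvStepA (s : PySem.Dict Char Char × Nat × List Char) (letter : Char) :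
    PySem.Dict Char Char × Nat × List Char :=
  if PySem.Chars.isupper letter = false then
    (s.1, s.2.1, s.2.2 ++ [letter])
  else
    let mc :=
      if s.1.contains letter = false then
        (s.1.insert letter (pvAsciiUppercase.getD s.2.1 '?'), s.2.1 + 1)
      else (s.1, s.2.1)
    (mc.1, mc.2, s.2.2 ++ [mc.1.getD letter '?'])

def letter_pattern (text : String) : String :=
  String.ofList (((PySem.Str.upper text).toList.foldl pvStepA (PySem.Dict.empty, 0, [])).2.2)

-- ===== PORT B =====
-- 'c in up' for the single character c is list membership; 'present.sort(key=up.index)'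
-- is PySem's stable sort keyed by the index of the first occurrence (every member of
-- present occurs in up, so up.index never raises and List.idxOf is exact).
-- str.maketrans(''.join(present), ascii_uppercase[:len(present)]) + translate is ported
-- as its contract: each char equal to present[i] becomes ascii_uppercase[i], others pass.
def letter_pattern_alt (text : String) : String :=
  let up := (PySem.Str.upper text).toList
  let present := pvAsciiUppercase.filter (fun c => up.contains c)
  let sortedP := PySem.List.sorted present (fun c => up.idxOf c) false
  String.ofList (up.map (fun c =>
    match PySem.List.index? sortedP c with
    | some i => pvAsciiUppercase.getD i '?'
    | none => c))

-- ===== PRECONDITION & SPEC =====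
def Spec_letter_pattern (text : String) (out : String) : Prop := out = letter_pattern_alt text
instance (text : String) (out : String) : Decidable (Spec_letter_pattern text out) := by unfold Spec_letter_pattern; infer_instance

-- ===== CLAIM =====
def Claim_equal_letter_pattern : Prop := ∀ (text : String), Dom_letter_pattern text → Spec_letter_pattern text (letter_pattern text)

-- ===== LEMMAS AND PROOFS =====

-- Proof-side helper: the dictionary A builds, without the interleaved output.
def pvDictStep (m : PySem.Dict Char Char) (c : Char) : PySem.Dict Char Char :=
  if PySem.Chars.isupper c && m.contains c = false then
    m.insert c (pvAsciiUppercase.getD m.size '?')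
  else m

-- Proof-side helper: the distinct uppercase letters of l in first-appearance order.
def pvF : List Char → List Char
  | [] => []
  | c :: r => if PySem.Chars.isupper c = true then c :: (pvF r).filter (fun a => a != c) else pvF r


lemma pvAscii_nodup : pvAsciiUppercase.Nodup := by decide

lemma pvAscii_eq_range : pvAsciiUppercase = (List.range 26).map (fun i => Char.ofNat (65 + i)) := by
  decide

lemma pvMem_ascii (a : Char) : a ∈ pvAsciiUppercase ↔ 65 ≤ a.toNat ∧ a.toNat ≤ 90 := by
  rw [pvAscii_eq_range, List.mem_map]
  constructor
  · rintro ⟨i, hi, rfl⟩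
    rw [List.mem_range] at hi
    rw [Char.toNat_ofNat, if_pos (Or.inl (by omega))]
    omega
  · rintro ⟨h1, h2⟩
    refine ⟨a.toNat - 65, by rw [List.mem_range]; omega, ?_⟩
    have h : 65 + (a.toNat - 65) = a.toNat := by omega
    rw [h, Char.ofNat_toNat]

lemma pvIsupper_iff_mem (a : Char) :
    PySem.Chars.isupper a = true ↔ a ∈ pvAsciiUppercase := by
  have hA : 'A' ≤ a ↔ 65 ≤ a.toNat := by rw [Char.le_def, UInt32.le_iff_toNat_le]; exact Iff.rfl
  have hZ : a ≤ 'Z' ↔ a.toNat ≤ 90 := by rw [Char.le_def, UInt32.le_iff_toNat_le]; exact Iff.rfl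
  simp only [PySem.Chars.isupper, Bool.and_eq_true, decide_eq_true_eq, hA, hZ, pvMem_ascii]

lemma pvF_mem (l : List Char) (a : Char) :
    a ∈ pvF l ↔ PySem.Chars.isupper a = true ∧ a ∈ l := by
  induction l with
  | nil => simp [pvF]
  | cons c r ih =>
    by_cases hup : PySem.Chars.isupper c = true
    · simp only [pvF, if_pos hup, List.mem_cons, List.mem_filter, ih, bne_iff_ne]
      rcases eq_or_ne a c with rfl | hne
      · simp [hup]
      · simp only [hne, false_or, ne_eq, not_false_iff, and_true]
    · simp only [pvF, if_neg hup, ih, List.mem_cons]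
      constructor
      · rintro ⟨h1, h2⟩; exact ⟨h1, Or.inr h2⟩
      · rintro ⟨h1, (rfl | h2)⟩
        · exact absurd h1 hup
        · exact ⟨h1, h2⟩

lemma pvF_nodup (l : List Char) : (pvF l).Nodup := by
  induction l with
  | nil => simp [pvF]
  | cons c r ih =>
    by_cases hup : PySem.Chars.isupper c = true
    · rw [pvF, if_pos hup, List.nodup_cons]
      refine ⟨?_, ih.filter _⟩
      simp [List.mem_filter]
    · rw [pvF, if_neg hup]; exact ih

lemma pvF_pairwise (l : List Char) :
    (pvF l).Pairwise (fun a b => l.idxOf a < l.idxOf b) := by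
  induction l with
  | nil => simp [pvF]
  | cons c r ih =>
    by_cases hup : PySem.Chars.isupper c = true
    · rw [pvF, if_pos hup]
      refine List.Pairwise.cons ?_ ?_
      · intro b hb
        rw [List.mem_filter, bne_iff_ne] at hb
        rw [List.idxOf_cons_self, List.idxOf_cons_ne r (Ne.symm hb.2)]
        exact Nat.succ_pos _
      · exact (ih.filter _).imp_of_mem (fun {a b} ha hb hab => by
          rw [List.mem_filter, bne_iff_ne] at ha hb
          rw [List.idxOf_cons_ne r (Ne.symm ha.2), List.idxOf_cons_ne r (Ne.symm hb.2)]
          omega)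
    · rw [pvF, if_neg hup]
      exact ih.imp_of_mem (fun {a b} ha hb hab => by
        have hane : c ≠ a := by
          rintro rfl; exact hup ((pvF_mem r c).mp ha).1
        have hbne : c ≠ b := by
          rintro rfl; exact hup ((pvF_mem r c).mp hb).1
        rw [List.idxOf_cons_ne r hane, List.idxOf_cons_ne r hbne]
        omega)

-- Unfolding lemmas for pvDictStep, one per branch.
lemma pvDictStep_of_new (m : PySem.Dict Char Char) (c : Char)
    (hup : PySem.Chars.isupper c = true) (hcon : m.contains c = false) :
    pvDictStep m c = m.insert c (pvAsciiUppercase.getD m.size '?') := by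
  simp [pvDictStep, hup, hcon]

lemma pvDictStep_of_old (m : PySem.Dict Char Char) (c : Char) (hcon : m.contains c = true) :
    pvDictStep m c = m := by
  simp [pvDictStep, hcon]

lemma pvDictStep_of_nonupper (m : PySem.Dict Char Char) (c : Char)
    (hup : PySem.Chars.isupper c = false) :
    pvDictStep m c = m := by
  simp [pvDictStep, hup]

-- The fold's dictionary, relative to an already-accumulated first-seen list F.
lemma pvDict_aux (l : List Char) (F : List Char) (m : PySem.Dict Char Char)
    (hsize : m.size = F.length)
    (hget : ∀ k, m.get? k
      = (PySem.List.index? F k).map (fun i => pvAsciiUppercase.getD i '?')) :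
    ∀ k, (l.foldl pvDictStep m).get? k
      = (PySem.List.index? (F ++ (pvF l).filter (fun a => !(F.contains a))) k).map
          (fun i => pvAsciiUppercase.getD i '?') := by
  induction l generalizing F m with
  | nil =>
    intro k
    simpa [pvF] using hget k
  | cons c r ih =>
    intro k
    by_cases hup : PySem.Chars.isupper c = true
    · by_cases hcF : c ∈ F
      · -- already mapped: dict unchanged, and c is dropped from the new suffix
        have hcon : m.contains c = true := by
          rw [PySem.Dict.contains_eq_isSome_get?, hget c, Option.isSome_map]
          rw [PySem.List.index?_isSome_iff]
          exact hcF
        have hlist : F ++ (pvF (c :: r)).filter (fun a => !(F.contains a))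
            = F ++ (pvF r).filter (fun a => !(F.contains a)) := by
          rw [pvF, if_pos hup]
          congr 1
          rw [List.filter_cons]
          have : (!(F.contains c)) = false := by simp [hcF]
          rw [this, if_neg (by simp), List.filter_filter]
          apply List.filter_congr
          intro a _
          rcases eq_or_ne a c with rfl | hne
          · simp [hcF]
          · simp [hne]
        rw [List.foldl_cons, pvDictStep_of_old m c hcon, hlist]
        exact ih F m hsize hget k
      · -- fresh letter: insert it, and extend F by c
        have hcon : m.contains c = false := by
          rw [PySem.Dict.contains_eq_isSome_get?, hget c, Option.isSome_map]
          simp [hcF]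
        have hsize' : (m.insert c (pvAsciiUppercase.getD m.size '?')).size
            = (F ++ [c]).length := by
          rw [PySem.Dict.size_insert, hcon]
          simp [hsize]
        have hget' : ∀ k', (m.insert c (pvAsciiUppercase.getD m.size '?')).get? k'
            = (PySem.List.index? (F ++ [c]) k').map (fun i => pvAsciiUppercase.getD i '?') := by
          intro k'
          rcases eq_or_ne k' c with heq | hne
          · rw [heq, PySem.Dict.get?_insert_self, PySem.List.index?_append_singleton_self F c hcF]
            simp [hsize]
          · rw [PySem.Dict.get?_insert_of_ne _ _ hne, hget k']
            congr 1
            by_cases hkF : k' ∈ F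
            · rw [PySem.List.index?_append_of_mem _ hkF]
            · rw [(PySem.List.index?_eq_none_iff F k').mpr hkF,
                (PySem.List.index?_eq_none_iff (F ++ [c]) k').mpr (by simp [hkF, hne])]
        have hlist : F ++ (pvF (c :: r)).filter (fun a => !(F.contains a))
            = (F ++ [c]) ++ (pvF r).filter (fun a => !((F ++ [c]).contains a)) := by
          rw [pvF, if_pos hup, List.filter_cons]
          have hc : (!(F.contains c)) = true := by simp [hcF]
          rw [hc, if_pos rfl, List.filter_filter, List.append_cons]
          congr 1
          apply List.filter_congr
          intro a _
          by_cases hac : a = c <;> by_cases haF : a ∈ F <;>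
            simp [hac, haF, hcF]
        rw [List.foldl_cons, pvDictStep_of_new m c hup hcon, hlist]
        exact ih (F ++ [c]) _ hsize' hget' k
    · have hup' : PySem.Chars.isupper c = false := by simpa using hup
      have hlist : (pvF (c :: r)) = pvF r := by rw [pvF, if_neg hup]
      rw [List.foldl_cons, pvDictStep_of_nonupper m c hup', hlist]
      exact ih F m hsize hget k

lemma pvDict_get? (l : List Char) (k : Char) :
    (l.foldl pvDictStep PySem.Dict.empty).get? k
      = (PySem.List.index? (pvF l) k).map (fun i => pvAsciiUppercase.getD i '?') := by
  have h := pvDict_aux l [] PySem.Dict.empty (by simp [PySem.Dict.size_empty])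
    (by intro k'; simp [PySem.Dict.get?_empty, PySem.List.index?]) k
  simpa using h

lemma pvSorted_eq (l : List Char) :
    PySem.List.sorted (pvAsciiUppercase.filter (fun c => l.contains c))
      (fun c => l.idxOf c) false = pvF l := by
  apply PySem.List.sorted_eq_of_perm_of_pairwise_lt
  · rw [List.perm_ext_iff_of_nodup (pvF_nodup l) (pvAscii_nodup.filter _)]
    intro a
    rw [pvF_mem, List.mem_filter, pvIsupper_iff_mem]
    simp only [List.contains_iff_mem]
  · exact pvF_pairwise l

-- The fold never deletes or overwrites an existing binding.
lemma pvFoldB_mono (l : List Char) (m : PySem.Dict Char Char) (k : Char) (v : Char)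
    (h : m.get? k = some v) : (l.foldl pvDictStep m).get? k = some v := by
  induction l generalizing m with
  | nil => exact h
  | cons c l ih =>
    simp only [List.foldl_cons]
    by_cases hup : PySem.Chars.isupper c = true
    · by_cases hcon : m.contains c = true
      · rw [pvDictStep_of_old m c hcon]; exact ih m h
      · have hcon' : m.contains c = false := by simpa using hcon
        rw [pvDictStep_of_new m c hup hcon']
        apply ih
        have hne : k ≠ c := by
          rintro rfl
          rw [PySem.Dict.contains_eq_isSome_get?, h] at hcon'
          simp at hcon'
        rw [PySem.Dict.get?_insert_of_ne _ _ hne]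
        exact h
    · rw [pvDictStep_of_nonupper m c (by simpa using hup)]; exact ih m h

-- Every key the fold ever binds is an uppercase letter.
lemma pvFoldB_upper (l : List Char) (m : PySem.Dict Char Char)
    (hm : ∀ k, (m.get? k).isSome → PySem.Chars.isupper k = true)
    (k : Char) (hk : ((l.foldl pvDictStep m).get? k).isSome) :
    PySem.Chars.isupper k = true := by
  induction l generalizing m with
  | nil => exact hm k hk
  | cons c l ih =>
    simp only [List.foldl_cons] at hk
    by_cases hup : PySem.Chars.isupper c = true
    · by_cases hcon : m.contains c = true
      · rw [pvDictStep_of_old m c hcon] at hk; exact ih m hm hk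
      · have hcon' : m.contains c = false := by simpa using hcon
        rw [pvDictStep_of_new m c hup hcon'] at hk
        refine ih _ ?_ hk
        intro k' hk'
        rcases eq_or_ne k' c with rfl | hne
        · exact hup
        · rw [PySem.Dict.get?_insert_of_ne _ _ hne] at hk'; exact hm k' hk'
    · rw [pvDictStep_of_nonupper m c (by simpa using hup)] at hk; exact ih m hm hk

-- Main invariant: A's interleaved loop run from a state whose count equals the mapping
-- size produces the pvDictStep fold's final mapping, its size, and the translation of
-- the remaining characters through that final mapping.
lemma pvMain (l : List Char) (m : PySem.Dict Char Char) (p : List Char)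
    (hm : ∀ k, (m.get? k).isSome → PySem.Chars.isupper k = true) :
    l.foldl pvStepA (m, m.size, p) =
      (l.foldl pvDictStep m, (l.foldl pvDictStep m).size,
        p ++ l.map (fun c => (l.foldl pvDictStep m).getD c c)) := by
  induction l generalizing m p with
  | nil => simp
  | cons c l ih =>
    simp only [List.foldl_cons, List.map_cons]
    by_cases hup : PySem.Chars.isupper c = true
    · by_cases hcon : m.contains c = true
      · have hsome : (m.get? c).isSome := by
          rw [← PySem.Dict.contains_eq_isSome_get?]; exact hcon
        obtain ⟨v, hv⟩ := Option.isSome_iff_exists.mp hsome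
        have hstepA : pvStepA (m, m.size, p) c = (m, m.size, p ++ [v]) := by
          have hgd : m.getD c '?' = v := PySem.Dict.getD_of_get?_eq_some m '?' hv
          simp [pvStepA, hup, hcon, hgd]
        have hstepB : pvDictStep m c = m := pvDictStep_of_old m c hcon
        have hlook : (l.foldl pvDictStep m).getD c c = v :=
          PySem.Dict.getD_of_get?_eq_some (l.foldl pvDictStep m) c (pvFoldB_mono l m c v hv)
        rw [hstepA, hstepB, ih m (p ++ [v]) hm, hlook]
        simp
      · have hcon' : m.contains c = false := by simpa using hcon
        have hstepA : pvStepA (m, m.size, p) c =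
            (m.insert c (pvAsciiUppercase.getD m.size '?'),
             m.size + 1,
             p ++ [pvAsciiUppercase.getD m.size '?']) := by
          simp [pvStepA, hup, hcon', PySem.Dict.getD_insert_self]
        have hstepB := pvDictStep_of_new m c hup hcon'
        have hsize : (m.insert c (pvAsciiUppercase.getD m.size '?')).size = m.size + 1 := by
          rw [PySem.Dict.size_insert, hcon']; simp
        have hm' : ∀ k, ((m.insert c (pvAsciiUppercase.getD m.size '?')).get? k).isSome →
            PySem.Chars.isupper k = true := by
          intro k hk
          rcases eq_or_ne k c with rfl | hne
          · exact hup
          · rw [PySem.Dict.get?_insert_of_ne _ _ hne] at hk; exact hm k hk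
        have hlook : (l.foldl pvDictStep (m.insert c (pvAsciiUppercase.getD m.size '?'))).getD c c
            = pvAsciiUppercase.getD m.size '?' :=
          PySem.Dict.getD_of_get?_eq_some
            (l.foldl pvDictStep (m.insert c (pvAsciiUppercase.getD m.size '?'))) c
            (pvFoldB_mono l _ c _ (PySem.Dict.get?_insert_self _ _ _))
        rw [hstepA, hstepB, ← hsize,
          ih (m.insert c (pvAsciiUppercase.getD m.size '?')) _ hm', hlook]
        simp
    · have hup' : PySem.Chars.isupper c = false := by simpa using hup
      have hstepA : pvStepA (m, m.size, p) c = (m, m.size, p ++ [c]) := by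
        simp [pvStepA, hup']
      have hstepB := pvDictStep_of_nonupper m c hup'
      have hnone : (l.foldl pvDictStep m).get? c = none := by
        by_contra h
        have hcu := pvFoldB_upper l m hm c (Option.isSome_iff_ne_none.mpr h)
        rw [hup'] at hcu
        exact Bool.false_ne_true hcu
      have hlook : (l.foldl pvDictStep m).getD c c = c :=
        PySem.Dict.getD_of_get?_eq_none (l.foldl pvDictStep m) c hnone
      rw [hstepA, hstepB, ih m (p ++ [c]) hm, hlook]
      simp

-- ===== VERDICT =====
theorem letter_pattern_spec : Claim_equal_letter_pattern := by
  intro text _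
  unfold Spec_letter_pattern letter_pattern letter_pattern_alt
  have h := pvMain (PySem.Str.upper text).toList PySem.Dict.empty []
    (by intro k hk; simp [PySem.Dict.get?_empty] at hk)
  simp only [PySem.Dict.size_empty] at h
  rw [h]
  simp only [List.nil_append]
  rw [pvSorted_eq]
  congr 1
  apply List.map_congr_left
  intro c _
  have hg := pvDict_get? (PySem.Str.upper text).toList c
  cases h' : PySem.List.index? (pvF (PySem.Str.upper text).toList) c with
  | none =>
    rw [h', Option.map_none] at hg
    rw [PySem.Dict.getD_of_get?_eq_none _ _ hg]
  | some i =>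
    rw [h', Option.map_some] at hg
    rw [PySem.Dict.getD_of_get?_eq_some _ _ hg]
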